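-- pv_equiv track=rewrite | github.com/Vamdez/PythonExercises | Pacote/duvidas/string manipul.py | tudo
-- ===== SOURCE A (Python) =====
-- def tudo(vocab_words):
--     palavra = vocab_words[0] + ':'
--     for c in range(1, len(vocab_words)):
--         if c == len(vocab_words) - 1:
--             palavra += f': {vocab_words[0] + vocab_words[c]}'
--         else:
--             palavra += f': {vocab_words[0] + vocab_words[c]} :'
--     return palavra
-- ===== SOURCE B (Python) =====
-- def tudo(vocab_words):
--     first = vocab_words[0]
--     if len(vocab_words) == 1:
--         return first + ':'
--     return first + ':: ' + ' :: '.join(first + w for w in vocab_words[1:])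
-- ===== Notes on version B (the rewrite author's own statement) =====
-- stated objective: simpler
-- what changed: Replaces the index loop with its is-this-the-last-index branch by a single join over the combined words of the tail, handling the one-word case up front.
import Mathlib
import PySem

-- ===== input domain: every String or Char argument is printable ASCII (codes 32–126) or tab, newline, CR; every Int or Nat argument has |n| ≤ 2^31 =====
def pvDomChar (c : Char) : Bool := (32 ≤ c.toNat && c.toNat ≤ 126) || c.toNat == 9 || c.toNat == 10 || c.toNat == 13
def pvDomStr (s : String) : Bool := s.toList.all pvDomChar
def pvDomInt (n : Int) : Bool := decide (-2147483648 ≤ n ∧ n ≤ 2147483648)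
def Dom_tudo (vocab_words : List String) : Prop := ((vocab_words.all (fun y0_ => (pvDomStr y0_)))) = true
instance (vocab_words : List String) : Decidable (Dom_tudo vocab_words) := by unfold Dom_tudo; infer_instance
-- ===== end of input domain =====

-- B replaces A's index loop (with its last-index branch) by one join over the tail's
-- combined words; same cost, simpler shape. Pre_ excludes only [] (A raises IndexError).

-- ===== PORT A =====
-- loop body of A: one step of 'for c in range(1, len(vocab_words))'
def tudoStep (vocab_words : List String) (palavra : String) (c : Int) : String :=
  if c == (vocab_words.length : Int) - 1 then
    palavra ++ ": " ++ ((PySem.List.pyGet? vocab_words 0).getD "" ++ (PySem.List.pyGet? vocab_words c).getD "")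
  else
    palavra ++ ": " ++ ((PySem.List.pyGet? vocab_words 0).getD "" ++ (PySem.List.pyGet? vocab_words c).getD "") ++ " :"

def tudo (vocab_words : List String) : String :=
  let palavra := (PySem.List.pyGet? vocab_words 0).getD "" ++ ":"
  (PySem.List.pyRange 1 (vocab_words.length : Int) 1).foldl (tudoStep vocab_words) palavra

-- ===== PORT B =====
def tudo_alt (vocab_words : List String) : String :=
  let first := (PySem.List.pyGet? vocab_words 0).getD ""
  if vocab_words.length == 1 then first ++ ":"
  else first ++ ":: " ++
    PySem.Str.join " :: " ((PySem.List.slice vocab_words (some 1) none).map (fun w => first ++ w))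

-- ===== PRECONDITION & SPEC =====
-- Pre_ excludes [] only: there A raises IndexError (vocab_words[0]).
def Pre_tudo (vocab_words : List String) : Prop := vocab_words ≠ []
instance (vocab_words : List String) : Decidable (Pre_tudo vocab_words) := by unfold Pre_tudo; infer_instance
def pvWitness_tudo : List String := (["ca", "sa", "mento"])

def Spec_tudo (vocab_words : List String) (out : String) : Prop := out = tudo_alt vocab_words
instance (vocab_words : List String) (out : String) : Decidable (Spec_tudo vocab_words out) := by unfold Spec_tudo; infer_instance

-- ===== CLAIM (what is proved, stated in full; the proofs are below) =====
def Claim_equal_tudo : Prop := ∀ (vocab_words : List String), Dom_tudo vocab_words → Pre_tudo vocab_words → Spec_tudo vocab_words (tudo vocab_words)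

-- ===== LEMMAS AND PROOFS =====

theorem join_singleton' (s a : String) : PySem.Str.join s [a] = a := by
  simp [PySem.Str.join, PySem.Chars.join, List.intercalate]

theorem join_cons' (s a b : String) (r : List String) :
    PySem.Str.join s (a :: b :: r) = a ++ s ++ PySem.Str.join s (b :: r) := by
  simp [PySem.Str.join, PySem.Chars.join_cons_cons, String.append_assoc]

-- invariant of A's loop: from index i (< len) onwards it appends ": " and the joined tail
theorem fold_loop (v : List String) :
    ∀ (k i : Nat) (acc : String), v.length = i + k → 0 < k →
    (PySem.List.pyRange (i : Int) (v.length : Int) 1).foldl (tudoStep v) acc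
      = acc ++ ": " ++ PySem.Str.join " :: "
          ((v.drop i).map (fun w => (PySem.List.pyGet? v 0).getD "" ++ w)) := by
  intro k
  induction k with
  | zero => intro i acc _ h0; omega
  | succ k ih =>
    intro i acc hlen _
    have hi : i < v.length := by omega
    have hcons : PySem.List.pyRange (i : Int) (v.length : Int) 1
        = (i : Int) :: PySem.List.pyRange ((i : Int) + 1) (v.length : Int) 1 :=
      PySem.List.pyRange_one_cons (by exact_mod_cast hi)
    have hget : PySem.List.pyGet? v (i : Int) = some v[i] := by
      simp [PySem.List.pyGet?_natCast, List.getElem?_eq_getElem hi]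
    have hdrop : v.drop i = v[i] :: v.drop (i + 1) := List.drop_eq_getElem_cons hi
    rcases Nat.eq_zero_or_pos k with hk0 | hkpos
    · -- last iteration: i = length - 1
      subst hk0
      have hlast : v.length = i + 1 := by omega
      have hnil : PySem.List.pyRange ((i : Int) + 1) (v.length : Int) 1 = [] :=
        PySem.List.pyRange_one_eq_nil (by simp [hlast])
      have hdrop1 : v.drop (i + 1) = [] := List.drop_eq_nil_of_le (by omega)
      rw [hcons, List.foldl_cons, hnil, List.foldl_nil, tudoStep, hget]
      rw [if_pos (by simp [hlast])]
      rw [hdrop, hdrop1, List.map_cons, List.map_nil, join_singleton']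
      simp only [Option.getD_some]
    · -- middle iteration
      have hne : ((i : Int) == (v.length : Int) - 1) = false := by
        simp; omega
      have hrec := ih (i + 1) (tudoStep v acc (i : Int)) (by omega) hkpos
      rw [hcons, List.foldl_cons]
      have hcast : ((i : Int) + 1) = ((i + 1 : Nat) : Int) := by push_cast; ring
      rw [hcast, hrec]
      have hdrop2 : i + 1 < v.length := by omega
      have hdrop1 : v.drop (i + 1) = v[i+1] :: v.drop (i + 2) := List.drop_eq_getElem_cons hdrop2
      rw [hdrop, hdrop1]
      simp only [List.map_cons]
      rw [join_cons']
      rw [tudoStep, hget, if_neg (by simp; omega)]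
      simp only [Option.getD_some, String.append_assoc]
      congr 1

-- ===== VERDICT (by name: the statement is the Claim_ definition above) =====
theorem tudo_spec : Claim_equal_tudo := by
  intro v _ hpre
  unfold Spec_tudo
  rcases v with _ | ⟨h, t⟩
  · exact absurd rfl hpre
  rcases t with _ | ⟨b, r⟩
  · simp [tudo, tudo_alt, PySem.List.pyRange_one_eq_nil]
  · have hlen : (h :: b :: r).length = 1 + (1 + r.length) := by simp; omega
    have hfold := fold_loop (h :: b :: r) (1 + r.length) 1
      ((PySem.List.pyGet? (h :: b :: r) 0).getD "" ++ ":") hlen (by omega)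
    push_cast at hfold
    simp only [tudo, tudo_alt]
    rw [hfold]
    have h1 : ((h :: b :: r).length == 1) = false := by simp
    rw [h1]
    simp only [Bool.false_eq_true, if_false, PySem.List.slice_from_one, List.tail_cons,
      List.drop_succ_cons, List.drop_zero, String.append_assoc]
    congr 1
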